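-- pv_equiv track=rewrite | github.com/tttor/csipb-jamu-prj | predictor/synergy/topology_score.py | get_index_protein_number
-- ===== SOURCE A (Python) =====
-- def get_index_protein_number(indexProtein,listProtein):
-- 	counterIndex=0
-- 	numberIndexProtein=[]
-- 	for row in indexProtein:
-- 		counterList=0
-- 		for row2 in listProtein:
-- 			if(row2==row):
-- 				numberIndexProtein.insert(counterIndex,counterList)
-- 			counterList=counterList+1
-- 		counterIndex=counterIndex+1
-- 	return numberIndexProtein
-- ===== SOURCE B (Python) =====
-- def get_index_protein_number(indexProtein, listProtein):
--     # Index listProtein once: value -> list of positions, then replay the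
--     # per-row inserts without rescanning listProtein for every row.
--     positions = {}
--     for j, p in enumerate(listProtein):
--         positions.setdefault(p, []).append(j)
--     numberIndexProtein = []
--     for i, row in enumerate(indexProtein):
--         for j in positions.get(row, []):
--             numberIndexProtein.insert(i, j)
--     return numberIndexProtein
-- ===== Notes on version B (the rewrite author's own statement) =====
-- stated objective: alternative
-- what changed: B builds a dict mapping each protein value to its positions in listProtein in one pass and then replays the per-row inserts from that index, replacing A's inner scan of listProtein for every row of indexProtein.
import Mathlib
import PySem

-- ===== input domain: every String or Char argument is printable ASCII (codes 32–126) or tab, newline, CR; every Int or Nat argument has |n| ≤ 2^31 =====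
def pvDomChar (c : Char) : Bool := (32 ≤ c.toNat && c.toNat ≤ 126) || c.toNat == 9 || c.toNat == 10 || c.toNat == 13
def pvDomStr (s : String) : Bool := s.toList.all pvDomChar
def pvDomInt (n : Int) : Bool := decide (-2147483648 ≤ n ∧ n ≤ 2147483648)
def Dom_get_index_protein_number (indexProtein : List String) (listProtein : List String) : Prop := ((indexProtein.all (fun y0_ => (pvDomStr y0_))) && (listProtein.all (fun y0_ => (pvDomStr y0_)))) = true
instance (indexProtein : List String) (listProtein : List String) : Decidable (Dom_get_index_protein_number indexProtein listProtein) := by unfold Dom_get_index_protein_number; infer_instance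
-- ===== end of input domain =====

-- B indexes listProtein once (value -> positions) and replays the per-row inserts from that
-- dict, removing A's inner scan of listProtein for every row of indexProtein.

-- ===== PORT A =====
def get_index_protein_number (indexProtein : List String) (listProtein : List String) : List Int :=
  (indexProtein.foldl
    (fun (st : Int × List Int) row =>
      (st.1 + 1,
       (listProtein.foldl
         (fun (st2 : Int × List Int) row2 =>
           (st2.1 + 1, if row2 == row then PySem.List.insert st2.2 st.1 st2.1 else st2.2))
         (0, st.2)).2))
    (0, [])).2

-- ===== PORT B =====
-- positions = {}; for j, p in enumerate(listProtein): positions.setdefault(p, []).append(j)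
def pvGroupPositions (listProtein : List String) : PySem.Dict String (List Int) :=
  (PySem.List.enumerate listProtein 0).foldl
    (fun d q => d.modify q.2 [] (fun v => v ++ [q.1])) PySem.Dict.empty

-- for i, row in enumerate(indexProtein): for j in positions.get(row, []): result.insert(i, j)
def get_index_protein_number_alt (indexProtein : List String) (listProtein : List String) : List Int :=
  let positions := pvGroupPositions listProtein
  (PySem.List.enumerate indexProtein 0).foldl
    (fun (res : List Int) q =>
      (positions.getD q.2 []).foldl (fun a j => PySem.List.insert a q.1 j) res) []

-- ===== PRECONDITION & SPEC =====
def Spec_get_index_protein_number (indexProtein : List String) (listProtein : List String) (out : List Int) : Prop := out = get_index_protein_number_alt indexProtein listProtein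
instance (indexProtein : List String) (listProtein : List String) (out : List Int) : Decidable (Spec_get_index_protein_number indexProtein listProtein out) := by unfold Spec_get_index_protein_number; infer_instance

-- ===== CLAIM (what is proved, stated in full; the proofs are below) =====
def Claim_equal_get_index_protein_number : Prop := ∀ (indexProtein : List String) (listProtein : List String), Dom_get_index_protein_number indexProtein listProtein → Spec_get_index_protein_number indexProtein listProtein (get_index_protein_number indexProtein listProtein)

-- ===== LEMMAS AND PROOFS =====

-- positions (as Int, counting from c) at which row occurs in the list
def pvMatchIdx (row : String) : List String → Int → List Int
  | [], _ => []
  | x :: xs, c => if x == row then c :: pvMatchIdx row xs (c + 1) else pvMatchIdx row xs (c + 1)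

theorem pvInnerA (row : String) (ci : Int) :
    ∀ (l : List String) (c : Int) (acc : List Int),
      l.foldl (fun (st2 : Int × List Int) row2 =>
          (st2.1 + 1, if row2 == row then PySem.List.insert st2.2 ci st2.1 else st2.2)) (c, acc)
      = (c + l.length, (pvMatchIdx row l c).foldl (fun a p => PySem.List.insert a ci p) acc) := by
  intro l
  induction l with
  | nil => intro c acc; simp [pvMatchIdx]
  | cons x xs ih =>
    intro c acc
    simp only [List.foldl]
    rw [ih]
    by_cases h : x == row
    · simp [pvMatchIdx, h, Prod.ext_iff]
      omega
    · simp [pvMatchIdx, h, Prod.ext_iff]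
      omega

theorem pvGroupD :
    ∀ (l : List (Int × String)) (d : PySem.Dict String (List Int)) (c : String),
      (l.foldl (fun d q => d.modify q.2 [] (fun v => v ++ [q.1])) d).getD c []
      = d.getD c [] ++ (l.filter (fun q => q.2 == c)).map (·.1) := by
  intro l
  induction l with
  | nil => intro d c; simp
  | cons q qs ih =>
    intro d c
    by_cases h : c = q.2
    · simp [List.foldl, ih, h]
    · simp [List.foldl, ih, PySem.Dict.getD_modify, Ne.symm h]
      exact fun hcq => absurd hcq h

theorem pvEnumFilter (row : String) :
    ∀ (l : List String) (s : Int),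
      ((PySem.List.enumerate l s).filter (fun q => q.2 == row)).map (·.1) = pvMatchIdx row l s := by
  intro l
  induction l with
  | nil => intro s; simp [PySem.List.enumerate_nil, pvMatchIdx]
  | cons x xs ih =>
    intro s
    by_cases h : x == row
    · simp [PySem.List.enumerate_cons, h, pvMatchIdx, ih]
    · simp [PySem.List.enumerate_cons, h, pvMatchIdx, ih]

theorem pvPositionsD (listProtein : List String) (row : String) :
    (pvGroupPositions listProtein).getD row [] = pvMatchIdx row listProtein 0 := by
  unfold pvGroupPositions
  rw [pvGroupD]
  simp [pvEnumFilter]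

-- A's whole loop, rewritten as B's fold of inserts over the grouped positions
theorem pvOuter (lp : List String) :
    ∀ (ind : List String) (s : Int) (acc : List Int),
      (ind.foldl
        (fun (st : Int × List Int) row =>
          (st.1 + 1,
           (lp.foldl
             (fun (st2 : Int × List Int) row2 =>
               (st2.1 + 1, if row2 == row then PySem.List.insert st2.2 st.1 st2.1 else st2.2))
             (0, st.2)).2))
        (s, acc)).2
      = (PySem.List.enumerate ind s).foldl
          (fun a q => ((pvGroupPositions lp).getD q.2 []).foldl (fun a p => PySem.List.insert a q.1 p) a) acc := by
  intro ind
  induction ind with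
  | nil => intro s acc; simp [PySem.List.enumerate_nil]
  | cons row rest ih =>
    intro s acc
    simp only [List.foldl, PySem.List.enumerate_cons]
    rw [pvInnerA row s lp 0 acc]
    rw [ih (s + 1) _]
    simp [pvPositionsD]

-- ===== VERDICT (by name: the statement is the Claim_ definition above) =====
theorem get_index_protein_number_spec : Claim_equal_get_index_protein_number := by
  intro indexProtein listProtein _
  unfold Spec_get_index_protein_number get_index_protein_number get_index_protein_number_alt
  exact pvOuter listProtein indexProtein 0 []
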